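-- pv_equiv track=rewrite | github.com/Jeetski/Chronos_Engine | modules/scheduler/kairos_v2.py | _runtime_helper_kind
-- ===== SOURCE A (Python) =====
-- from typing import Any, Dict, List, Optional
--
-- def _runtime_helper_kind(selected_children: List[Dict[str, Any]]) -> str:
--     """
--     Classify a helper window by the strongest reason it exists.
--     """
--     if any(bool(child.get("manual_injected")) for child in selected_children):
--         return "manual_opportunity"
--     if any(str(child.get("deadline") or "").strip() for child in selected_children):
--         return "deadline_pressure"
--     if any(str(child.get("due_date") or "").strip() for child in selected_children):
--         return "due_pressure"
--     return "opportunity"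
-- ===== SOURCE B (Python) =====
-- from typing import Any, Dict, List, Optional
--
-- def _runtime_helper_kind(selected_children: List[Dict[str, Any]]) -> str:
--     saw_deadline = False
--     saw_due = False
--     for child in selected_children:
--         if child.get("manual_injected"):
--             return "manual_opportunity"
--         if str(child.get("deadline") or "").strip():
--             saw_deadline = True
--         if str(child.get("due_date") or "").strip():
--             saw_due = True
--     if saw_deadline:
--         return "deadline_pressure"
--     if saw_due:
--         return "due_pressure"
--     return "opportunity"
-- ===== Notes on version B (the rewrite author's own statement) =====
-- stated objective: alternative
-- what changed: Replaced three priority-ordered any() scans over the whole list by a single pass that returns 'manual_opportunity' immediately and otherwise maintains two boolean flags, deciding the answer after the loop.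
import Mathlib
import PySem

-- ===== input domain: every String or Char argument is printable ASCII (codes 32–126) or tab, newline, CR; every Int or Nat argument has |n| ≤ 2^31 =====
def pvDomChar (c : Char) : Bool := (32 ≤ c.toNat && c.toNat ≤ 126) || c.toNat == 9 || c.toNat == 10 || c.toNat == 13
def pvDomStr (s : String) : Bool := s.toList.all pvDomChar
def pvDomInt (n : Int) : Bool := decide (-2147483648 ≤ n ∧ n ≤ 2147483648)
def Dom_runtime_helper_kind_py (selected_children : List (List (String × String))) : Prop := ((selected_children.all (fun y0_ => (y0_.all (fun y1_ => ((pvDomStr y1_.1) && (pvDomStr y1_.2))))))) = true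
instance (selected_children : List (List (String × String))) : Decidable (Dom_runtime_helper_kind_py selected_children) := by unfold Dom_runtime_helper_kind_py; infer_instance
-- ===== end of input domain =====

-- B replaces A's three priority-ordered any() scans by a single pass keeping two boolean flags (objective: alternative decomposition, same cost).


-- ===== PORT A =====
-- child.get(k): first-match lookup in the association list (dict convention)
def pvGetA (child : List (String × String)) (k : String) : Option String :=
  (child.find? (fun p => p.1 == k)).map (·.2)

-- bool(child.get("manual_injected")): some non-empty string
def pvManualA (child : List (String × String)) : Bool :=
  match pvGetA child "manual_injected" with
  | some v => v != ""
  | none => false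

-- str(child.get(k) or "").strip() truthiness
def pvPressA (child : List (String × String)) (k : String) : Bool :=
  PySem.Str.strip (match pvGetA child k with
    | some v => if v != "" then v else ""
    | none => "") != ""

def runtime_helper_kind_py (selected_children : List (List (String × String))) : String :=
  if selected_children.any (fun child => pvManualA child) then "manual_opportunity"
  else if selected_children.any (fun child => pvPressA child "deadline") then "deadline_pressure"
  else if selected_children.any (fun child => pvPressA child "due_date") then "due_pressure"
  else "opportunity"

-- ===== PORT B =====
def pvGetB (child : List (String × String)) (k : String) : Option String :=
  (child.find? (fun p => p.1 == k)).map (·.2)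

def pvTruthyB (child : List (String × String)) (k : String) : Bool :=
  PySem.Str.strip (match pvGetB child k with
    | some v => if v != "" then v else ""
    | none => "") != ""

-- one pass, two flags, early return on manual_injected
def pvLoopB : List (List (String × String)) → Bool → Bool → String
  | [], sawDeadline, sawDue =>
      if sawDeadline then "deadline_pressure"
      else if sawDue then "due_pressure"
      else "opportunity"
  | child :: rest, sawDeadline, sawDue =>
      if (match pvGetB child "manual_injected" with | some v => v != "" | none => false) then
        "manual_opportunity"
      else
        pvLoopB rest (sawDeadline || pvTruthyB child "deadline") (sawDue || pvTruthyB child "due_date")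

def runtime_helper_kind_py_alt (selected_children : List (List (String × String))) : String :=
  pvLoopB selected_children false false

-- ===== PRECONDITION & SPEC =====
def Spec_runtime_helper_kind_py (selected_children : List (List (String × String))) (out : String) : Prop := out = runtime_helper_kind_py_alt selected_children
instance (selected_children : List (List (String × String))) (out : String) : Decidable (Spec_runtime_helper_kind_py selected_children out) := by unfold Spec_runtime_helper_kind_py; infer_instance

-- ===== CLAIM (what is proved, stated in full; the proofs are below) =====
def Claim_equal_runtime_helper_kind_py : Prop := ∀ (selected_children : List (List (String × String))), Dom_runtime_helper_kind_py selected_children → Spec_runtime_helper_kind_py selected_children (runtime_helper_kind_py selected_children)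

-- ===== LEMMAS AND PROOFS =====

-- B's loop in closed form: the three scans, with the flags folded in
theorem pvLoopB_spec (cs : List (List (String × String))) (sawD sawU : Bool) :
    pvLoopB cs sawD sawU =
      if cs.any (fun child => pvManualA child) then "manual_opportunity"
      else if sawD || cs.any (fun child => pvPressA child "deadline") then "deadline_pressure"
      else if sawU || cs.any (fun child => pvPressA child "due_date") then "due_pressure"
      else "opportunity" := by
  induction cs generalizing sawD sawU with
  | nil => simp [pvLoopB]
  | cons c rest ih =>
      have h1 : (match pvGetB c "manual_injected" with
          | some v => v != "" | none => false) = pvManualA c := rfl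
      have h2 : pvTruthyB c "deadline" = pvPressA c "deadline" := rfl
      have h3 : pvTruthyB c "due_date" = pvPressA c "due_date" := rfl
      simp only [pvLoopB, List.any_cons, h1, h2, h3]
      by_cases hm : pvManualA c
      · simp [hm]
      · rw [ih]
        simp [hm, Bool.or_assoc]

-- ===== VERDICT (by name: the statement is the Claim_ definition above) =====
theorem runtime_helper_kind_py_spec : Claim_equal_runtime_helper_kind_py := by
  intro cs _
  show runtime_helper_kind_py cs = runtime_helper_kind_py_alt cs
  rw [runtime_helper_kind_py_alt, pvLoopB_spec]
  simp [runtime_helper_kind_py]
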